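-- pv_equiv track=rewrite | github.com/Zhanbingli/my_ebooks_YC | scripts/polish_chapters.py | add_subheadings
-- ===== SOURCE A (Python) =====
-- from typing import List, Tuple
--
-- def add_subheadings(paras: List[str]) -> List[str]:
--     if len(paras) < 6:
--         return paras
--     headings = [
--         "## Introduction",
--         "## Key Ideas",
--         "## Technical Insights",
--         "## Applications",
--         "## Conclusion",
--     ]
--     # Decide number of sections based on length
--     sections = min(len(headings), max(2, min(5, len(paras) // 6)))
--     heads = headings[:sections]
--     # Compute cut points
--     result: List[str] = []
--     n = len(paras)
--     for idx, h in enumerate(heads):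
--         start = (n * idx) // sections
--         end = (n * (idx + 1)) // sections
--         if idx == 0:
--             result.append(h)
--         else:
--             result.append("")
--             result.append(h)
--         result.extend(paras[start:end])
--     return result
-- ===== SOURCE B (Python) =====
-- from typing import List
--
-- def add_subheadings(paras: List[str]) -> List[str]:
--     n = len(paras)
--     if n < 6:
--         return paras
--     headings = [
--         "## Introduction",
--         "## Key Ideas",
--         "## Technical Insights",
--         "## Applications",
--         "## Conclusion",
--     ]
--     sections = max(2, min(5, n // 6))
--     starts = {(n * s) // sections: headings[s] for s in range(sections)}
--     result: List[str] = []
--     for i, p in enumerate(paras):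
--         h = starts.get(i)
--         if h is not None:
--             if i > 0:
--                 result.append("")
--             result.append(h)
--         result.append(p)
--     return result
-- ===== Notes on version B (the rewrite author's own statement) =====
-- stated objective: alternative
-- what changed: A builds the result section by section, slicing paras[start:end] for each heading; B precomputes a dict mapping section-start indices to headings and produces the result in one element-wise pass over enumerate(paras), inserting a heading (and the blank separator) whenever the index is a section start.
import Mathlib
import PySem

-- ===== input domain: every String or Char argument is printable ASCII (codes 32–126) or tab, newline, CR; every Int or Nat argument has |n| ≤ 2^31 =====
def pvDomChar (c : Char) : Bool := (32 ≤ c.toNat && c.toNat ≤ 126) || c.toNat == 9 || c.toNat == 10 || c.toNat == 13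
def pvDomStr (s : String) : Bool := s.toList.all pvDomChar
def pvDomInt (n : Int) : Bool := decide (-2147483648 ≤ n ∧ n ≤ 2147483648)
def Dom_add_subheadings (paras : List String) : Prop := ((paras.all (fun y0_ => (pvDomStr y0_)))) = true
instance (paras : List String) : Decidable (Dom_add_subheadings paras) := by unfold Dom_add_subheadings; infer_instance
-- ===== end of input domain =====

-- B replaces A's per-section slicing loop by a precomputed dict of section-start indices and one
-- element-wise pass over the paragraphs (objective: alternative decomposition, same cost).

-- the heading constants, shared verbatim by both Pythons
def pvHeadings : List String :=
  ["## Introduction", "## Key Ideas", "## Technical Insights", "## Applications", "## Conclusion"]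

-- ===== PORT A ===== (literal transliteration: per-section loop, each section appends its heading then its slice)
def add_subheadings (paras : List String) : List String :=
  if paras.length < 6 then paras
  else
    let n : Int := paras.length
    let sections : Int := min (pvHeadings.length : Int) (max 2 (min 5 (PySem.Int.floordiv n 6)))
    let heads := PySem.List.slice pvHeadings none (some sections)
    (PySem.List.enumerate heads).foldl
      (fun result ih =>
        let start := PySem.Int.floordiv (n * ih.1) sections
        let stop := PySem.Int.floordiv (n * (ih.1 + 1)) sections
        (if ih.1 = 0 then result ++ [ih.2] else result ++ [""] ++ [ih.2])
          ++ PySem.List.slice paras (some start) (some stop))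
      []

-- ===== PORT B ===== (literal transliteration of Source B: dict of start indices, one pass over enumerate(paras))
def add_subheadings_alt (paras : List String) : List String :=
  let n : Int := paras.length
  if n < 6 then paras
  else
    let sections : Int := max 2 (min 5 (PySem.Int.floordiv n 6))
    let starts : PySem.Dict Int String :=
      (PySem.List.pyRange 0 sections).foldl
        (fun d s => d.insert (PySem.Int.floordiv (n * s) sections) (PySem.List.pyGetD pvHeadings s ""))
        PySem.Dict.empty
    (PySem.List.enumerate paras).foldl
      (fun result (ip : Int × String) =>
        match starts.get? ip.1 with
        | some h => (if ip.1 > 0 then result ++ [""] else result) ++ [h] ++ [ip.2]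
        | none => result ++ [ip.2])
      []

-- ===== PRECONDITION & SPEC =====
def Spec_add_subheadings (paras : List String) (out : List String) : Prop := out = add_subheadings_alt paras
instance (paras : List String) (out : List String) : Decidable (Spec_add_subheadings paras out) := by unfold Spec_add_subheadings; infer_instance

-- ===== CLAIM (what is proved, stated in full; the proofs are below) =====
def Claim_equal_add_subheadings : Prop := ∀ (paras : List String), Dom_add_subheadings paras → Spec_add_subheadings paras (add_subheadings paras)

-- ===== LEMMAS AND PROOFS =====

-- number of sections and section start indices, as Nat
def pvK (n : Nat) : Nat := max 2 (min 5 (n / 6))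
def pvCut (n k s : Nat) : Nat := n * s / k

-- the contribution of section s in A's loop
def pvBlockA (paras : List String) (n k s : Nat) : List String :=
  (if s = 0 then [] else [""]) ++ [pvHeadings.getD s ""]
    ++ ((paras.drop (pvCut n k s)).take (pvCut n k (s + 1) - pvCut n k s))

-- B's start-index dict, over Nat parameters
def pvD (n k : Nat) : PySem.Dict Int String :=
  (PySem.List.pyRange 0 (k : Int)).foldl
    (fun d s => d.insert (PySem.Int.floordiv ((n : Int) * s) (k : Int)) (PySem.List.pyGetD pvHeadings s ""))
    PySem.Dict.empty

-- B's single pass over a list of (Nat) indices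
def pvPassB (paras : List String) (n k : Nat) (js : List Nat) : List String :=
  js.flatMap (fun (j : Nat) =>
    match (pvD n k).get? (j : Int) with
    | some h => (if 0 < j then [""] else []) ++ [h] ++ [paras.getD j ""]
    | none => [paras.getD j ""])

lemma pvCut_zero (n k : Nat) : pvCut n k 0 = 0 := by simp [pvCut]

lemma pvCut_self (n k : Nat) (hk : 0 < k) : pvCut n k k = n := by
  simp [pvCut, Nat.mul_div_cancel _ hk]

lemma pvCut_step (n k s : Nat) (hk : 0 < k) (hkn : k ≤ n) :
    pvCut n k s < pvCut n k (s + 1) := by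
  have h1 : n * s / k + 1 = (n * s + k) / k := by
    rw [Nat.add_div_right _ hk]
  have h2 : (n * s + k) / k ≤ (n * s + n) / k := Nat.div_le_div_right (by omega)
  have : n * (s + 1) = n * s + n := by ring
  simp only [pvCut, this]
  omega

lemma pvCut_mono (n k : Nat) (hk : 0 < k) (hkn : k ≤ n) {s t : Nat} (h : s < t) :
    pvCut n k s < pvCut n k t := by
  induction t with
  | zero => omega
  | succ t ih =>
    rcases Nat.lt_succ_iff_lt_or_eq.mp h with h' | h'
    · exact lt_trans (ih h') (pvCut_step n k t hk hkn)
    · subst h'; exact pvCut_step n k s hk hkn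

lemma pvCut_le_n (n k : Nat) (hk : 0 < k) (hkn : k ≤ n) {t : Nat} (ht : t ≤ k) :
    pvCut n k t ≤ n := by
  rcases Nat.lt_or_ge t k with h | h
  · have h1 := pvCut_mono n k hk hkn h
    rw [pvCut_self n k hk] at h1
    omega
  · have ht' : t = k := by omega
    rw [ht']; exact le_of_eq (pvCut_self n k hk)

lemma pvCut_cast (n k t : Nat) :
    PySem.Int.floordiv ((n : Int) * (t : Int)) (k : Int) = ((pvCut n k t : Int)) := by
  have h : ((n : Int) * (t : Int)) = ((n * t : Nat) : Int) := by push_cast; ring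
  rw [h, PySem.Int.floordiv_natCast]; rfl

lemma pvD_items (n k : Nat) (hk : 0 < k) (hkn : k ≤ n) :
    (pvD n k).items
      = (List.range k).map (fun t => (((pvCut n k t : Int)), pvHeadings.getD t "")) := by
  have hbody : pvD n k
      = (List.range k).foldl
          (fun d t => d.insert ((pvCut n k t : Nat) : Int) (pvHeadings.getD t ""))
          PySem.Dict.empty := by
    rw [pvD, PySem.List.pyRange_zero_nat, List.foldl_map]
    refine PySem.List.foldl_congr_mem _ _ _ _ ?_
    intro d t _
    rw [pvCut_cast, PySem.List.pyGetD_natCast]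
  have hnod : ((List.range k).map (fun t => ((pvCut n k t : Int)))).Nodup := by
    refine (List.Pairwise.map _ ?_ List.pairwise_lt_range).imp (fun h => ne_of_lt h)
    intro a b hab
    exact_mod_cast pvCut_mono n k hk hkn hab
  rw [hbody]
  rw [PySem.Dict.items_foldl_insert_fresh (List.range k)
      (fun t => ((pvCut n k t : Int))) (fun t => pvHeadings.getD t "") PySem.Dict.empty
      (fun a _ => PySem.Dict.contains_empty _) hnod]
  rfl

lemma pvD_keys (n k : Nat) (hk : 0 < k) (hkn : k ≤ n) :
    (pvD n k).keys = (List.range k).map (fun t => ((pvCut n k t : Int))) := by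
  have : (pvD n k).keys = (pvD n k).items.map (·.1) := rfl
  rw [this, pvD_items n k hk hkn, List.map_map]
  rfl

lemma pvD_keys_nodup (n k : Nat) (hk : 0 < k) (hkn : k ≤ n) : (pvD n k).keys.Nodup := by
  rw [pvD_keys n k hk hkn]
  refine (List.Pairwise.map _ ?_ List.pairwise_lt_range).imp (fun h => ne_of_lt h)
  intro a b hab
  exact_mod_cast pvCut_mono n k hk hkn hab

lemma pvD_get?_cut (n k t : Nat) (hk : 0 < k) (hkn : k ≤ n) (ht : t < k) :
    (pvD n k).get? ((pvCut n k t : Int)) = some (pvHeadings.getD t "") := by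
  rw [PySem.Dict.get?_eq_some_iff_mem_items _ _ _ (pvD_keys_nodup n k hk hkn),
      pvD_items n k hk hkn]
  exact List.mem_map.mpr ⟨t, List.mem_range.mpr ht, rfl⟩

lemma pvD_get?_none (n k j : Nat) (hk : 0 < k) (hkn : k ≤ n)
    (h : ∀ t, t < k → j ≠ pvCut n k t) :
    (pvD n k).get? (j : Int) = none := by
  rw [PySem.Dict.get?_eq_none_iff_not_mem_keys, pvD_keys n k hk hkn]
  intro hmem
  rcases List.mem_map.mp hmem with ⟨t, ht, heq⟩
  exact h t (List.mem_range.mp ht) (by exact_mod_cast heq.symm)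

lemma pv_map_getD_range' {α : Type} (l : List α) (d : α) (a m : Nat) (h : a + m ≤ l.length) :
    (List.range' a m).map (fun j => l.getD j d) = (l.drop a).take m := by
  apply List.ext_getElem
  · simp; omega
  · intro i h1 h2
    simp only [List.getElem_map, List.getElem_range', List.getElem_take, List.getElem_drop]
    have hlt : a + i < l.length := by simp at h1; omega
    have e : a + 1 * i = a + i := by ring
    rw [e, List.getD_eq_getElem l d hlt]

-- one section's worth of B's pass equals A's block for that section
lemma pvPassB_segment (paras : List String) (k s : Nat)
    (hk : 0 < k) (hkn : k ≤ paras.length) (hs : s < k) :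
    pvPassB paras paras.length k
        (List.range' (pvCut paras.length k s) (pvCut paras.length k (s + 1) - pvCut paras.length k s))
      = pvBlockA paras paras.length k s := by
  set n := paras.length with hn
  have hstep := pvCut_step n k s hk hkn
  obtain ⟨m, hm⟩ : ∃ m, pvCut n k (s + 1) - pvCut n k s = m + 1 :=
    ⟨pvCut n k (s + 1) - pvCut n k s - 1, by omega⟩
  rw [hm, List.range'_succ]
  simp only [pvPassB, List.flatMap_cons]
  have hget : (pvD n k).get? ((pvCut n k s : Nat) : Int) = some (pvHeadings.getD s "") :=
    pvD_get?_cut n k s hk hkn hs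
  rw [hget]
  have hnone : ∀ j ∈ List.range' (pvCut n k s + 1) m, (pvD n k).get? (j : Int) = none := by
    intro j hj
    rw [List.mem_range'_1] at hj
    apply pvD_get?_none n k j hk hkn
    intro t ht heq
    rcases Nat.lt_or_ge t (s + 1) with h' | h'
    · have : pvCut n k t ≤ pvCut n k s := by
        rcases Nat.lt_or_ge t s with h'' | h''
        · exact le_of_lt (pvCut_mono n k hk hkn h'')
        · have : t = s := by omega
          subst this; exact le_refl _
      omega
    · have : pvCut n k (s + 1) ≤ pvCut n k t := by
        rcases Nat.lt_or_ge (s + 1) t with h'' | h''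
        · exact le_of_lt (pvCut_mono n k hk hkn h'')
        · have : t = s + 1 := by omega
          subst this; exact le_refl _
      omega
  have htail : (List.range' (pvCut n k s + 1) m).flatMap (fun (j : Nat) =>
      match (pvD n k).get? (j : Int) with
      | some h => (if 0 < j then [""] else []) ++ [h] ++ [paras.getD j ""]
      | none => [paras.getD j ""])
      = (List.range' (pvCut n k s + 1) m).map (fun j => paras.getD j "") := by
    rw [List.map_eq_flatMap]
    refine List.flatMap_congr ?_
    intro j hj
    rw [hnone j hj]
  rw [htail]
  have hle : pvCut n k (s + 1) ≤ n := pvCut_le_n n k hk hkn (by omega)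
  have hmap : (List.range' (pvCut n k s) (m + 1)).map (fun j => paras.getD j "")
      = (paras.drop (pvCut n k s)).take (m + 1) :=
    pv_map_getD_range' paras "" _ _ (by omega)
  rw [List.range'_succ, List.map_cons] at hmap
  have hifeq : (if 0 < pvCut n k s then [""] else ([] : List String))
      = (if s = 0 then [] else [""]) := by
    rcases Nat.eq_zero_or_pos s with rfl | hs0
    · simp [pvCut_zero]
    · have hpos := pvCut_mono n k hk hkn hs0
      rw [pvCut_zero] at hpos
      rw [if_pos hpos, if_neg (by omega)]
  rw [pvBlockA, hm, ← hmap, hifeq]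
  simp

-- the whole pass, by downward induction on the remaining sections
lemma pvPassB_all (paras : List String) (k : Nat)
    (hk : 0 < k) (hkn : k ≤ paras.length) :
    ∀ m s, s + m = k →
      pvPassB paras paras.length k
          (List.range' (pvCut paras.length k s) (paras.length - pvCut paras.length k s))
        = (List.range' s (k - s)).flatMap (pvBlockA paras paras.length k) := by
  intro m
  induction m with
  | zero =>
    intro s hs
    have hsk : s = k := by omega
    subst hsk
    rw [pvCut_self _ _ hk]
    simp [pvPassB]
  | succ m ih =>
    intro s hs
    have hsk : s < k := by omega
    have h1 : pvCut paras.length k s < pvCut paras.length k (s + 1) :=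
      pvCut_step _ _ _ hk hkn
    have h2 : pvCut paras.length k (s + 1) ≤ paras.length :=
      pvCut_le_n _ _ hk hkn (by omega)
    have hsplit : List.range' (pvCut paras.length k s) (paras.length - pvCut paras.length k s)
        = List.range' (pvCut paras.length k s) (pvCut paras.length k (s + 1) - pvCut paras.length k s)
          ++ List.range' (pvCut paras.length k (s + 1)) (paras.length - pvCut paras.length k (s + 1)) := by
      have h3 := List.range'_append (s := pvCut paras.length k s)
        (m := pvCut paras.length k (s + 1) - pvCut paras.length k s)
        (n := paras.length - pvCut paras.length k (s + 1)) (step := 1)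
      rw [one_mul, Nat.add_sub_cancel' (le_of_lt h1)] at h3
      rw [h3]
      congr 1
      omega
    rw [hsplit]
    rw [show pvPassB paras paras.length k (_ ++ _)
        = pvPassB paras paras.length k (List.range' (pvCut paras.length k s)
            (pvCut paras.length k (s + 1) - pvCut paras.length k s))
          ++ pvPassB paras paras.length k (List.range' (pvCut paras.length k (s + 1))
            (paras.length - pvCut paras.length k (s + 1)))
      from List.flatMap_append]
    rw [pvPassB_segment paras k s hk hkn hsk, ih (s + 1) (by omega)]
    have hks : k - s = (k - (s + 1)) + 1 := by omega
    rw [hks, List.range'_succ, List.flatMap_cons]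

lemma pvA_eq (paras : List String) (h6 : 6 ≤ paras.length) :
    add_subheadings paras
      = (List.range (pvK paras.length)).flatMap (pvBlockA paras paras.length (pvK paras.length)) := by
  have hfd : PySem.Int.floordiv (paras.length : Int) 6 = ((paras.length / 6 : Nat) : Int) := by
    exact_mod_cast PySem.Int.floordiv_natCast paras.length 6
  have hsec : min ((pvHeadings.length : Nat) : Int)
        (max 2 (min 5 (PySem.Int.floordiv (paras.length : Int) 6)))
      = ((pvK paras.length : Nat) : Int) := by
    rw [hfd]
    unfold pvK
    simp only [pvHeadings, List.length_cons, List.length_nil]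
    push_cast
    omega
  rw [add_subheadings, if_neg (by omega : ¬ paras.length < 6)]
  simp only [hsec, PySem.List.slice_to_natCast]
  rw [PySem.List.enumerate_eq_map_pyRange _ ""]
  have hlen : PySem.List.len (List.take (pvK paras.length) pvHeadings)
      = ((pvK paras.length : Nat) : Int) := by
    have hk5 : pvK paras.length ≤ 5 := by unfold pvK; omega
    simp [PySem.List.len, pvHeadings]
    omega
  rw [hlen, PySem.List.pyRange_zero_nat, List.foldl_map, List.foldl_map]
  rw [PySem.List.foldl_congr_mem _ _
      (fun (acc : List String) (t : Nat) => acc ++ pvBlockA paras paras.length (pvK paras.length) t) _ ?_]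
  · rw [PySem.List.foldl_append_eq_flatMap]
    simp
  · intro acc t ht
    have htk : t < pvK paras.length := List.mem_range.mp ht
    have hk5 : pvK paras.length ≤ 5 := by unfold pvK; omega
    have hget : PySem.List.pyGetD (List.take (pvK paras.length) pvHeadings) (t : Int) ""
        = pvHeadings.getD t "" := by
      rw [PySem.List.pyGetD_natCast]
      simp [List.getD_eq_getElem?_getD, List.getElem?_take_of_lt htk]
    have hc1 : PySem.Int.floordiv ((paras.length : Int) * (t : Int)) ((pvK paras.length : Nat) : Int)
        = ((pvCut paras.length (pvK paras.length) t : Int)) := pvCut_cast _ _ _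
    have hc2 : PySem.Int.floordiv ((paras.length : Int) * ((t : Int) + 1)) ((pvK paras.length : Nat) : Int)
        = ((pvCut paras.length (pvK paras.length) (t + 1) : Int)) := by
      rw [show ((t : Int) + 1) = ((t + 1 : Nat) : Int) by push_cast; ring]
      exact pvCut_cast _ _ _
    simp only [hget, hc1, hc2, PySem.List.slice_natCast, pvBlockA]
    rcases Nat.eq_zero_or_pos t with rfl | ht0
    · simp
    · rw [if_neg (by exact_mod_cast (by omega : ¬ ((t : Int) = 0))), if_neg (by omega)]
      simp

lemma pvB_eq (paras : List String) (h6 : 6 ≤ paras.length) :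
    add_subheadings_alt paras
      = pvPassB paras paras.length (pvK paras.length) (List.range paras.length) := by
  have hfd : PySem.Int.floordiv (paras.length : Int) 6 = ((paras.length / 6 : Nat) : Int) := by
    exact_mod_cast PySem.Int.floordiv_natCast paras.length 6
  have hsec : max 2 (min 5 (PySem.Int.floordiv (paras.length : Int) 6))
      = ((pvK paras.length : Nat) : Int) := by
    rw [hfd]; unfold pvK; push_cast; omega
  rw [add_subheadings_alt, if_neg (by exact_mod_cast (by omega : ¬ ((paras.length : Int) < 6)))]
  simp only [hsec]
  have hD : ((PySem.List.pyRange 0 ((pvK paras.length : Nat) : Int)).foldl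
      (fun d s => d.insert (PySem.Int.floordiv ((paras.length : Int) * s) ((pvK paras.length : Nat) : Int))
        (PySem.List.pyGetD pvHeadings s ""))
      PySem.Dict.empty) = pvD paras.length (pvK paras.length) := rfl
  rw [hD]
  rw [PySem.List.enumerate_eq_map_pyRange _ ""]
  have hlen : PySem.List.len paras = ((paras.length : Nat) : Int) := rfl
  rw [hlen, PySem.List.pyRange_zero_nat, List.foldl_map, List.foldl_map]
  rw [PySem.List.foldl_congr_mem _ _
      (fun (acc : List String) (j : Nat) => acc ++
        (match (pvD paras.length (pvK paras.length)).get? (j : Int) with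
          | some h => (if 0 < j then [""] else []) ++ [h] ++ [paras.getD j ""]
          | none => [paras.getD j ""])) _ ?_]
  · rw [PySem.List.foldl_append_eq_flatMap]
    simp [pvPassB]
  · intro acc j hj
    rcases hg : (pvD paras.length (pvK paras.length)).get? (j : Int) with _ | h
    · simp only [hg, PySem.List.pyGetD_natCast]
    · simp only [hg, PySem.List.pyGetD_natCast]
      rcases Nat.eq_zero_or_pos j with rfl | hj0
      · simp [List.getD_eq_getElem?_getD]
      · rw [if_pos (by exact_mod_cast hj0), if_pos hj0]
        simp [List.getD_eq_getElem?_getD]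

-- ===== VERDICT (by name: the statement is the Claim_ definition above) =====
theorem add_subheadings_spec : Claim_equal_add_subheadings := by
  intro paras _
  unfold Spec_add_subheadings
  by_cases h6 : paras.length < 6
  · rw [add_subheadings, add_subheadings_alt]
    simp [h6]
  · rw [Nat.not_lt] at h6
    set n := paras.length with hn
    have hk2 : 2 ≤ pvK n := le_max_left _ _
    have hk5 : pvK n ≤ 5 := by unfold pvK; omega
    have hkn : pvK n ≤ n := by omega
    rw [pvA_eq paras h6, pvB_eq paras h6]
    have := pvPassB_all paras (pvK n) (by omega) hkn (pvK n) 0 (by omega)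
    rw [pvCut_zero, Nat.sub_zero, Nat.sub_zero, ← List.range_eq_range', ← List.range_eq_range'] at this
    exact this.symm
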